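-- pv_equiv track=rewrite | github.com/moorthiguru33/backend-sample | backend/src/music_generator.py | _extract_mood_from_prompt
-- ===== SOURCE A (Python) =====
-- def _extract_mood_from_prompt(prompt: str) -> str:
--     """Extract mood from prompt text"""
--     prompt_lower = prompt.lower()
--
--     if any(word in prompt_lower for word in ['peaceful', 'calm', 'serene', 'shankarabharanam']):
--         return 'peaceful'
--     elif any(word in prompt_lower for word in ['joyful', 'happy', 'celebratory', 'kalyani']):
--         return 'joyful'
--     elif any(word in prompt_lower for word in ['romantic', 'love', 'tender', 'mohanam']):
--         return 'romantic'
--     elif any(word in prompt_lower for word in ['devotional', 'spiritual', 'divine', 'bhairavi']):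
--         return 'devotional'
--     elif any(word in prompt_lower for word in ['energetic', 'vigorous', 'lively']):
--         return 'energetic'
--     else:
--         return 'peaceful'  # Default
-- ===== SOURCE B (Python) =====
-- # Single left-to-right scan of the prompt: at each position check which keywords
-- # start there and keep the best (lowest) mood priority seen; index the mood table.
-- _MOODS = ['peaceful', 'joyful', 'romantic', 'devotional', 'energetic']
--
-- _KEYWORDS = [
--     ('peaceful', 0), ('calm', 0), ('serene', 0), ('shankarabharanam', 0),
--     ('joyful', 1), ('happy', 1), ('celebratory', 1), ('kalyani', 1),
--     ('romantic', 2), ('love', 2), ('tender', 2), ('mohanam', 2),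
--     ('devotional', 3), ('spiritual', 3), ('divine', 3), ('bhairavi', 3),
--     ('energetic', 4), ('vigorous', 4), ('lively', 4),
-- ]
--
--
-- def _extract_mood_from_prompt(prompt: str) -> str:
--     prompt_lower = prompt.lower()
--     best = 5
--     for i in range(len(prompt_lower)):
--         for kw, pri in _KEYWORDS:
--             if pri < best and prompt_lower.startswith(kw, i):
--                 best = pri
--     return _MOODS[best] if best < 5 else 'peaceful'
-- ===== Notes on version B (the rewrite author's own statement) =====
-- stated objective: alternative
-- what changed: Replaces the elif chain of per-keyword substring searches by a single left-to-right scan of the lowered prompt that, at each position, checks which keywords start there and keeps the minimum mood priority, then indexes a mood table.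
import Mathlib
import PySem

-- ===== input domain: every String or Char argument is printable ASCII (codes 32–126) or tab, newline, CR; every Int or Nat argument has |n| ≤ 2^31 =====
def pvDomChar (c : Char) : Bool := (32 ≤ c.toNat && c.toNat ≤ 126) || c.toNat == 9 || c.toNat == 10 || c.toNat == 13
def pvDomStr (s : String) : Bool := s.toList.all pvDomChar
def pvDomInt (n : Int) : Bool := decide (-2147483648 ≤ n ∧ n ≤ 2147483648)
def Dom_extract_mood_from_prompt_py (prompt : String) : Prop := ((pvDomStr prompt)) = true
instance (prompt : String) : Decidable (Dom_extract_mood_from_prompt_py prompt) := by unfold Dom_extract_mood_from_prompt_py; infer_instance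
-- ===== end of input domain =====

-- B replaces A's elif chain of substring tests by one positional scan of the prompt
-- keeping the minimum matching mood priority (objective: alternative, same cost).

-- ===== PORT A =====
def extract_mood_from_prompt_py (prompt : String) : String :=
  let pl := PySem.Str.lower prompt
  if (["peaceful", "calm", "serene", "shankarabharanam"].any fun w => PySem.Str.isIn w pl) then "peaceful"
  else if (["joyful", "happy", "celebratory", "kalyani"].any fun w => PySem.Str.isIn w pl) then "joyful"
  else if (["romantic", "love", "tender", "mohanam"].any fun w => PySem.Str.isIn w pl) then "romantic"
  else if (["devotional", "spiritual", "divine", "bhairavi"].any fun w => PySem.Str.isIn w pl) then "devotional"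
  else if (["energetic", "vigorous", "lively"].any fun w => PySem.Str.isIn w pl) then "energetic"
  else "peaceful"

-- ===== PORT B =====
def pvMoods : List String := ["peaceful", "joyful", "romantic", "devotional", "energetic"]

def pvKeywords : List (String × Nat) :=
  [("peaceful", 0), ("calm", 0), ("serene", 0), ("shankarabharanam", 0),
   ("joyful", 1), ("happy", 1), ("celebratory", 1), ("kalyani", 1),
   ("romantic", 2), ("love", 2), ("tender", 2), ("mohanam", 2),
   ("devotional", 3), ("spiritual", 3), ("divine", 3), ("bhairavi", 3),
   ("energetic", 4), ("vigorous", 4), ("lively", 4)]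

-- the scan loop of Source B (best over positions i, keywords kw)
def pvBest (s : List Char) : Nat :=
  (List.range s.length).foldl
    (fun b i => pvKeywords.foldl
      (fun b p => if p.2 < b ∧ PySem.Chars.startswith (s.drop i) p.1.toList = true then p.2 else b) b) 5

def extract_mood_from_prompt_py_alt (prompt : String) : String :=
  let s := PySem.Chars.lower prompt.toList
  let best := pvBest s
  if best < 5 then (PySem.List.pyGet? pvMoods (best : Int)).getD "peaceful" else "peaceful"

-- ===== PRECONDITION & SPEC =====
def Spec_extract_mood_from_prompt_py (prompt : String) (out : String) : Prop := out = extract_mood_from_prompt_py_alt prompt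
instance (prompt : String) (out : String) : Decidable (Spec_extract_mood_from_prompt_py prompt out) := by unfold Spec_extract_mood_from_prompt_py; infer_instance

-- ===== CLAIM (what is proved, stated in full; the proofs are below) =====
def Claim_equal_extract_mood_from_prompt_py : Prop := ∀ (prompt : String), Dom_extract_mood_from_prompt_py prompt → Spec_extract_mood_from_prompt_py prompt (extract_mood_from_prompt_py prompt)

-- ===== LEMMAS AND PROOFS =====

lemma pv_foldl_le_iff {α : Type} (f : Nat → α → Nat) (Q : α → Prop) (k : Nat)
    (hf : ∀ b x, f b x ≤ k ↔ b ≤ k ∨ Q x) :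
    ∀ (l : List α) (b : Nat), l.foldl f b ≤ k ↔ b ≤ k ∨ ∃ x ∈ l, Q x := by
  intro l
  induction l with
  | nil => simp
  | cons x l ih =>
    intro b
    simp only [List.foldl_cons, ih, hf, List.mem_cons]
    constructor
    · rintro ((h | h) | ⟨y, hy, hQ⟩)
      · exact Or.inl h
      · exact Or.inr ⟨x, Or.inl rfl, h⟩
      · exact Or.inr ⟨y, Or.inr hy, hQ⟩
    · rintro (h | ⟨y, hy | hy, hQ⟩)
      · exact Or.inl (Or.inl h)
      · exact Or.inl (Or.inr (hy ▸ hQ))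
      · exact Or.inr ⟨y, hy, hQ⟩

lemma pv_exists_pos_iff (s kw : List Char) (hkw : kw ≠ []) :
    (∃ i ∈ List.range s.length, PySem.Chars.startswith (s.drop i) kw = true)
      ↔ PySem.Chars.isIn kw s = true := by
  rw [← PySem.Chars.exists_prefix_drop_iff_isIn]
  constructor
  · rintro ⟨i, -, h⟩
    exact ⟨i, (PySem.Chars.startswith_iff _ _).mp h⟩
  · rintro ⟨j, h⟩
    have hj : j < s.length := by
      by_contra hge
      push_neg at hge
      rw [List.drop_eq_nil_of_le hge] at h
      exact hkw (List.prefix_nil.mp h)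
    exact ⟨j, List.mem_range.mpr hj, (PySem.Chars.startswith_iff _ _).mpr h⟩

lemma pv_best_le_iff (s : List Char) (k : Nat) :
    pvBest s ≤ k ↔ 5 ≤ k ∨ ∃ p ∈ pvKeywords, p.2 ≤ k ∧ PySem.Chars.isIn p.1.toList s = true := by
  unfold pvBest
  rw [pv_foldl_le_iff _
      (fun i => ∃ p ∈ pvKeywords, p.2 ≤ k ∧ PySem.Chars.startswith (s.drop i) p.1.toList = true) k ?_]
  · constructor
    · rintro (h | ⟨i, hi, p, hp, hpk, hsw⟩)
      · exact Or.inl h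
      · refine Or.inr ⟨p, hp, hpk, ?_⟩
        exact (pv_exists_pos_iff s p.1.toList (by fin_cases hp <;> simp)).mp ⟨i, hi, hsw⟩
    · rintro (h | ⟨p, hp, hpk, hin⟩)
      · exact Or.inl h
      · obtain ⟨i, hi, hsw⟩ := (pv_exists_pos_iff s p.1.toList (by fin_cases hp <;> simp)).mpr hin
        exact Or.inr ⟨i, hi, p, hp, hpk, hsw⟩
  · intro b i
    rw [pv_foldl_le_iff _ (fun p => p.2 ≤ k ∧ PySem.Chars.startswith (s.drop i) p.1.toList = true) k ?_]
    intro b' p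
    split_ifs with h
    · obtain ⟨h1, h2⟩ := h
      constructor
      · intro hle; exact Or.inr ⟨hle, h2⟩
      · rintro (hle | ⟨hle, -⟩)
        · omega
        · exact hle
    · constructor
      · intro hle; exact Or.inl hle
      · rintro (hle | ⟨hle, hsw⟩)
        · exact hle
        · have hnlt : ¬ p.2 < b' := fun hlt => h ⟨hlt, hsw⟩
          omega

theorem extract_mood_from_prompt_py_spec : Claim_equal_extract_mood_from_prompt_py := by
  intro prompt _
  show extract_mood_from_prompt_py prompt = extract_mood_from_prompt_py_alt prompt
  simp only [extract_mood_from_prompt_py, extract_mood_from_prompt_py_alt,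
    List.any_cons, List.any_nil, Bool.or_eq_true, 
    PySem.Str.isIn_eq, PySem.Str.toList_lower]
  set s := PySem.Chars.lower prompt.toList with hs
  set b := pvBest s with hb
  have hc : ∀ k, b ≤ k ↔ 5 ≤ k ∨ ∃ p ∈ pvKeywords, p.2 ≤ k ∧ PySem.Chars.isIn p.1.toList s = true := by
    intro k; rw [hb]; exact pv_best_le_iff s k
  clear_value b
  clear_value s
  have h5 : b ≤ 5 := (hc 5).mpr (Or.inl le_rfl)
  interval_cases b
  · have E := (hc 0).mp le_rfl
    simp only [pvKeywords, List.exists_mem_cons_iff] at E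
    norm_num at E
    rw [if_pos (by tauto)]
    rfl
  · have E := (hc 1).mp le_rfl
    have hN : ¬ (∃ p ∈ pvKeywords, p.2 ≤ 0 ∧ PySem.Chars.isIn p.1.toList s = true) := by
      intro hE; have := (hc 0).mpr (Or.inr hE); omega
    simp only [pvKeywords, List.exists_mem_cons_iff] at E hN
    norm_num at E hN
    obtain ⟨n1, n2, n3, n4⟩ := hN
    simp only [n1, n2, n3, n4] at E
    norm_num at E
    rw [if_neg (by simp only [n1, n2, n3, n4]; simp), if_pos (E.imp id (Or.imp id (Or.imp id Or.inl)))]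
    rfl
  · have E := (hc 2).mp le_rfl
    have hN : ¬ (∃ p ∈ pvKeywords, p.2 ≤ 1 ∧ PySem.Chars.isIn p.1.toList s = true) := by
      intro hE; have := (hc 1).mpr (Or.inr hE); omega
    simp only [pvKeywords, List.exists_mem_cons_iff] at E hN
    norm_num at E hN
    obtain ⟨n1, n2, n3, n4, n5, n6, n7, n8⟩ := hN
    simp only [n1, n2, n3, n4, n5, n6, n7, n8] at E
    norm_num at E
    rw [if_neg (by simp only [n1, n2, n3, n4]; simp), if_neg (by simp only [n5, n6, n7, n8]; simp), if_pos (E.imp id (Or.imp id (Or.imp id Or.inl)))]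
    rfl
  · have E := (hc 3).mp le_rfl
    have hN : ¬ (∃ p ∈ pvKeywords, p.2 ≤ 2 ∧ PySem.Chars.isIn p.1.toList s = true) := by
      intro hE; have := (hc 2).mpr (Or.inr hE); omega
    simp only [pvKeywords, List.exists_mem_cons_iff] at E hN
    norm_num at E hN
    obtain ⟨n1, n2, n3, n4, n5, n6, n7, n8, n9, n10, n11, n12⟩ := hN
    simp only [n1, n2, n3, n4, n5, n6, n7, n8, n9, n10, n11, n12] at E
    norm_num at E
    rw [if_neg (by simp only [n1, n2, n3, n4]; simp), if_neg (by simp only [n5, n6, n7, n8]; simp),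
        if_neg (by simp only [n9, n10, n11, n12]; simp), if_pos (E.imp id (Or.imp id (Or.imp id Or.inl)))]
    rfl
  · have E := (hc 4).mp le_rfl
    have hN : ¬ (∃ p ∈ pvKeywords, p.2 ≤ 3 ∧ PySem.Chars.isIn p.1.toList s = true) := by
      intro hE; have := (hc 3).mpr (Or.inr hE); omega
    simp only [pvKeywords, List.exists_mem_cons_iff] at E hN
    norm_num at E hN
    obtain ⟨n1, n2, n3, n4, n5, n6, n7, n8, n9, n10, n11, n12, n13, n14, n15, n16⟩ := hN
    simp only [n1, n2, n3, n4, n5, n6, n7, n8, n9, n10, n11, n12, n13, n14, n15, n16] at E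
    norm_num at E
    rw [if_neg (by simp only [n1, n2, n3, n4]; simp), if_neg (by simp only [n5, n6, n7, n8]; simp),
        if_neg (by simp only [n9, n10, n11, n12]; simp), if_neg (by simp only [n13, n14, n15, n16]; simp),
        if_pos (E.imp id (Or.imp id Or.inl))]
    rfl
  · have hN : ¬ (∃ p ∈ pvKeywords, p.2 ≤ 4 ∧ PySem.Chars.isIn p.1.toList s = true) := by
      intro hE; have := (hc 4).mpr (Or.inr hE); omega
    simp only [pvKeywords, List.exists_mem_cons_iff] at hN
    norm_num at hN
    obtain ⟨n1, n2, n3, n4, n5, n6, n7, n8, n9, n10, n11, n12, n13, n14, n15, n16, n17, n18, n19⟩ := hN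
    rw [if_neg (by simp only [n1, n2, n3, n4]; simp), if_neg (by simp only [n5, n6, n7, n8]; simp),
        if_neg (by simp only [n9, n10, n11, n12]; simp), if_neg (by simp only [n13, n14, n15, n16]; simp),
        if_neg (by simp only [n17, n18, n19]; simp)]
    rfl
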